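-- pv_equiv track=rewrite | github.com/gjones1911/ML_project_3 | knn_estimator.py | knn_vote3
-- ===== SOURCE A (Python) =====
-- def knn_vote3(dis_dic, tst_idx, model, kval):
--     vote_dic = {}
--     # go through test indices
--     for idx in tst_idx:
--         nn_l = list(map(int, dis_dic[idx]))
--         vote_dic[idx] = list([0, 0])
--         cnt = 0
--
--         for nn in nn_l:
--             if nn in model:
--                 cnt = cnt + 1
--                 if model[nn] == 2:
--                     vote_dic[idx][0] = vote_dic[idx][0] + 1
--                 else:
--                     vote_dic[idx][1] = vote_dic[idx][1] + 1
--                 if cnt == kval: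
--                     break
--
--     return vote_dic
-- ===== SOURCE B (Python) =====
-- def knn_vote3(dis_dic, tst_idx, model, kval):
--     # select-then-tally: gather labels of in-model neighbors, cut the prefix, count.
--     vote_dic = {}
--     for idx in tst_idx:
--         labels = [model[nn] for nn in map(int, dis_dic[idx]) if nn in model]
--         if kval >= 1:
--             labels = labels[:kval]
--         vote_dic[idx] = [sum(1 for l in labels if l == 2),
--                          sum(1 for l in labels if l != 2)]
--     return vote_dic
-- ===== Notes on version B (the rewrite author's own statement) =====
-- stated objective: simpler
-- what changed: Replaces the interleaved count-and-break inner loop by a select-then-tally decomposition: build the list of in-model neighbor labels, take the first kval of them (all when kval < 1, where A's break never fires), and tally the two vote counts with two sums.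
import Mathlib
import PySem

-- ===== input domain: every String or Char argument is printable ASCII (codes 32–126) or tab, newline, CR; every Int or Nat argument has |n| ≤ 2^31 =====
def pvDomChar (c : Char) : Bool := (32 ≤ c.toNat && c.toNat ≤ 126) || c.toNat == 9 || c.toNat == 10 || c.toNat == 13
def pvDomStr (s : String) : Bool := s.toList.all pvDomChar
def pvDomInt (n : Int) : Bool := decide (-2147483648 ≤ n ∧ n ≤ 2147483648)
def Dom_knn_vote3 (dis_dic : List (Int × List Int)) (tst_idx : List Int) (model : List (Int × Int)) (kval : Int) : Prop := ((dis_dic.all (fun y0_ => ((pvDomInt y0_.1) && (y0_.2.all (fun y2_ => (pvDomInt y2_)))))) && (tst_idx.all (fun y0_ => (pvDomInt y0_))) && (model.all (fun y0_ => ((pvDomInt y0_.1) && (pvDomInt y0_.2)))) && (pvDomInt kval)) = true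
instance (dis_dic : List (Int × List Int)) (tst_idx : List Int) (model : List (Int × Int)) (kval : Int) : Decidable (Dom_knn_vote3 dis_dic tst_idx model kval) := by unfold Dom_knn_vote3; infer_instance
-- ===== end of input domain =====

-- B replaces A's interleaved count-and-break inner loop by a select-then-tally
-- decomposition (filter the in-model labels, cut the prefix, count); same cost, simpler.

-- ===== PORT A =====
-- inner 'for nn in nn_l' loop of A, with its running cnt and the break at cnt == kval
def knn_vote3_loop (model : PySem.Dict Int Int) (kval : Int) : List Int → Int → Int → Int → Int × Int
  | [], _, v0, v1 => (v0, v1)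
  | nn :: rest, cnt, v0, v1 =>
    match model.get? nn with
    | none => knn_vote3_loop model kval rest cnt v0 v1
    | some m =>
      let cnt' := cnt + 1
      let v0' := if m == 2 then v0 + 1 else v0
      let v1' := if m == 2 then v1 else v1 + 1
      if cnt' = kval then (v0', v1') else knn_vote3_loop model kval rest cnt' v0' v1'

-- dis_dic[idx] raises KeyError on a missing key; Pre_ excludes that, getD [] is unreachable there
def knn_vote3 (dis_dic : List (Int × List Int)) (tst_idx : List Int) (model : List (Int × Int)) (kval : Int) : List (Int × List Int) :=
  (tst_idx.foldl (fun vd idx =>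
      let nn_l := (PySem.Dict.mk dis_dic).getD idx []
      let p := knn_vote3_loop (PySem.Dict.mk model) kval nn_l 0 0 0
      vd.insert idx [p.1, p.2]) PySem.Dict.empty).items

-- ===== PORT B =====
def knn_vote3_alt (dis_dic : List (Int × List Int)) (tst_idx : List Int) (model : List (Int × Int)) (kval : Int) : List (Int × List Int) :=
  (tst_idx.foldl (fun vd idx =>
      let labels := ((PySem.Dict.mk dis_dic).getD idx []).filterMap (fun nn => (PySem.Dict.mk model).get? nn)
      let labels' := if 1 ≤ kval then labels.take kval.toNat else labels
      vd.insert idx [((labels'.countP (fun l => l == 2) : Nat) : Int),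
                     ((labels'.countP (fun l => l != 2) : Nat) : Int)]) PySem.Dict.empty).items

-- ===== PRECONDITION & SPEC =====
-- Pre_ excludes exactly the inputs where Python A raises KeyError: a test index absent from dis_dic.
def Pre_knn_vote3 (dis_dic : List (Int × List Int)) (tst_idx : List Int) (model : List (Int × Int)) (kval : Int) : Prop :=
  ∀ idx ∈ tst_idx, idx ∈ dis_dic.map Prod.fst
instance (dis_dic : List (Int × List Int)) (tst_idx : List Int) (model : List (Int × Int)) (kval : Int) : Decidable (Pre_knn_vote3 dis_dic tst_idx model kval) := by unfold Pre_knn_vote3; infer_instance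
def pvWitness_knn_vote3 : (List (Int × List Int)) × List Int × (List (Int × Int)) × Int :=
  ([(0, [1, 2, 3]), (1, [2, 5])], [0, 1], [(1, 2), (2, 0), (3, 2)], 2)

def Spec_knn_vote3 (dis_dic : List (Int × List Int)) (tst_idx : List Int) (model : List (Int × Int)) (kval : Int) (out : List (Int × List Int)) : Prop := out = knn_vote3_alt dis_dic tst_idx model kval
instance (dis_dic : List (Int × List Int)) (tst_idx : List Int) (model : List (Int × Int)) (kval : Int) (out : List (Int × List Int)) : Decidable (Spec_knn_vote3 dis_dic tst_idx model kval out) := by unfold Spec_knn_vote3; infer_instance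

-- ===== CLAIM (what is proved, stated in full; the proofs are below) =====
def Claim_equal_knn_vote3 : Prop := ∀ (dis_dic : List (Int × List Int)) (tst_idx : List Int) (model : List (Int × Int)) (kval : Int), Dom_knn_vote3 dis_dic tst_idx model kval → Pre_knn_vote3 dis_dic tst_idx model kval → Spec_knn_vote3 dis_dic tst_idx model kval (knn_vote3 dis_dic tst_idx model kval)

-- ===== LEMMAS AND PROOFS =====

lemma knn_vote3_loop_eq (model : PySem.Dict Int Int) (kval : Int) :
    ∀ (nn_l : List Int) (cnt v0 v1 : Int), 0 ≤ cnt → (1 ≤ kval → cnt < kval) →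
    knn_vote3_loop model kval nn_l cnt v0 v1 =
      (v0 + ((if 1 ≤ kval then (nn_l.filterMap model.get?).take (kval - cnt).toNat
              else nn_l.filterMap model.get?).countP (fun l => l == 2) : Nat),
       v1 + ((if 1 ≤ kval then (nn_l.filterMap model.get?).take (kval - cnt).toNat
              else nn_l.filterMap model.get?).countP (fun l => l != 2) : Nat)) := by
  intro nn_l
  induction nn_l with
  | nil => intro cnt v0 v1 _ _; simp [knn_vote3_loop]
  | cons nn rest ih =>
    intro cnt v0 v1 h0 hk
    rw [knn_vote3_loop]
    cases hget : model.get? nn with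
    | none =>
      simp only [List.filterMap_cons, hget]
      exact ih cnt v0 v1 h0 hk
    | some m =>
      simp only [List.filterMap_cons, hget]
      by_cases hkv : 1 ≤ kval
      · by_cases hbrk : cnt + 1 = kval
        · have h1 : (kval - cnt).toNat = 1 := by omega
          simp only [if_pos hbrk, if_pos hkv, h1, List.take_succ_cons, List.take_zero,
            List.countP_cons, List.countP_nil]
          by_cases hm : m = 2 <;> simp [hm]
        · have hlt : cnt + 1 < kval := by omega
          have h2 : (kval - cnt).toNat = (kval - (cnt + 1)).toNat + 1 := by omega
          rw [if_neg hbrk, ih (cnt + 1) _ _ (by omega) (fun _ => hlt)]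
          simp only [if_pos hkv, h2, List.take_succ_cons, List.countP_cons]
          by_cases hm : m = 2 <;> simp [hm] <;> omega
      · have hbrk : cnt + 1 ≠ kval := by omega
        rw [if_neg hbrk, ih (cnt + 1) _ _ (by omega) (fun h => absurd h hkv)]
        simp only [if_neg hkv, List.countP_cons]
        by_cases hm : m = 2 <;> simp [hm] <;> omega

lemma knn_vote3_fold_eq (dis_dic : List (Int × List Int)) (model : List (Int × Int)) (kval : Int) :
    ∀ (tst_idx : List Int) (vd : PySem.Dict Int (List Int)),
    tst_idx.foldl (fun vd idx =>
      let nn_l := (PySem.Dict.mk dis_dic).getD idx []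
      let p := knn_vote3_loop (PySem.Dict.mk model) kval nn_l 0 0 0
      vd.insert idx [p.1, p.2]) vd =
    tst_idx.foldl (fun vd idx =>
      let labels := ((PySem.Dict.mk dis_dic).getD idx []).filterMap (fun nn => (PySem.Dict.mk model).get? nn)
      let labels' := if 1 ≤ kval then labels.take kval.toNat else labels
      vd.insert idx [((labels'.countP (fun l => l == 2) : Nat) : Int),
                     ((labels'.countP (fun l => l != 2) : Nat) : Int)]) vd := by
  intro tst_idx
  induction tst_idx with
  | nil => intro vd; rfl
  | cons idx rest ih =>
    intro vd
    simp only [List.foldl_cons]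
    rw [knn_vote3_loop_eq (PySem.Dict.mk model) kval _ 0 0 0 (by omega) (fun h => by omega)]
    simp only [Int.sub_zero, Int.zero_add]
    exact ih _

-- ===== VERDICT (by name: the statement is the Claim_ definition above) =====
theorem knn_vote3_spec : Claim_equal_knn_vote3 := by
  intro dis_dic tst_idx model kval _ _
  unfold Spec_knn_vote3 knn_vote3 knn_vote3_alt
  rw [knn_vote3_fold_eq]
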